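-- pv_equiv track=rewrite | github.com/asweigart/programmedpatterns | book/visualpatterns.py | formula69
-- ===== SOURCE A (Python) =====
-- def formula69(step):
--     width = 4
--     height = 3
--     for i in range(2, step + 1):
--         if i % 2 == 0:
--             width += 2
--             height += 1
--         elif i % 2 == 1:
--             height += 1
--     return width * height
-- ===== SOURCE B (Python) =====
-- def formula69(step):
--     # Closed form: the loop adds 1 to height for every i in 2..step and 2 to
--     # width for every even such i; no loop needed.
--     if step < 2:
--         return 12
--     return (4 + 2 * (step // 2)) * (step + 2)
-- ===== Notes on version B (the rewrite author's own statement) =====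
-- stated objective: faster
-- what changed: Replaced the linear accumulation loop with a closed-form product of the final width and height (constant base value when the loop body never runs).
import Mathlib
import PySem

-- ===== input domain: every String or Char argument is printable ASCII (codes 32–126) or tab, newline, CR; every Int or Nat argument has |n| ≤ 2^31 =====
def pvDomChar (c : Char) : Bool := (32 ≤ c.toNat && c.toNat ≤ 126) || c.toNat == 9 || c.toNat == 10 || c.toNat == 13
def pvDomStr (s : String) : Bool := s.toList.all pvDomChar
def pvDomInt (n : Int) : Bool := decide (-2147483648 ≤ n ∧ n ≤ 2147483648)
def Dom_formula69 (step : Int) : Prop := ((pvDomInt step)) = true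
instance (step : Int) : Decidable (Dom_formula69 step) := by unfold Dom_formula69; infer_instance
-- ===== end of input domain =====

-- B replaces A's O(step) accumulation loop with a closed-form O(1) product.


-- ===== PORT A =====
def formula69 (step : Int) : Int :=
  let wh := (PySem.List.pyRange 2 (step + 1) 1).foldl
    (fun (wh : Int × Int) i =>
      if PySem.Int.mod i 2 = 0 then (wh.1 + 2, wh.2 + 1)
      else if PySem.Int.mod i 2 = 1 then (wh.1, wh.2 + 1)
      else wh)
    (4, 3)
  wh.1 * wh.2

-- ===== PORT B =====
def formula69_alt (step : Int) : Int :=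
  if step < 2 then 12
  else (4 + 2 * PySem.Int.floordiv step 2) * (step + 2)

-- ===== PRECONDITION & SPEC =====
def Spec_formula69 (step : Int) (out : Int) : Prop := out = formula69_alt step
instance (step : Int) (out : Int) : Decidable (Spec_formula69 step out) := by unfold Spec_formula69; infer_instance

-- ===== CLAIM (what is proved, stated in full; the proofs are below) =====
def Claim_equal_formula69 : Prop := ∀ (step : Int), Dom_formula69 step → Spec_formula69 step (formula69 step)

-- ===== LEMMAS AND PROOFS =====

-- The loop body of A's port, named for reuse in the invariant proof.
def pvStep69 (wh : Int × Int) (i : Int) : Int × Int :=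
  if PySem.Int.mod i 2 = 0 then (wh.1 + 2, wh.2 + 1)
  else if PySem.Int.mod i 2 = 1 then (wh.1, wh.2 + 1)
  else wh

-- Loop invariant: after processing 2..n, width = 4 + 2*(n/2) and height = n + 2.
theorem pvLoop69 (n : Int) (h : 2 ≤ n) :
    (PySem.List.pyRange 2 (n + 1) 1).foldl pvStep69 (4, 3)
      = (4 + 2 * (n / 2), n + 2) := by
  induction n, h using Int.le_induction with
  | base =>
      rw [show (2:Int) + 1 = 3 by norm_num, PySem.List.pyRange_one_cons (by norm_num),
        PySem.List.pyRange_one_eq_nil (by norm_num)]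
      simp [pvStep69, PySem.Int.mod]
  | succ n hn ih =>
      rw [show n + 1 + 1 = (n + 1) + 1 by ring,
        PySem.List.pyRange_one_succ_right (by omega), List.foldl_append, ih]
      simp only [List.foldl, pvStep69]
      rw [PySem.Int.mod_eq_emod_of_pos (by norm_num : (0:Int) < 2)]
      rcases Int.emod_two_eq_zero_or_one (n + 1) with h2 | h2 <;>
        simp [h2] <;> omega

theorem formula69_spec : Claim_equal_formula69 := by
  intro step _
  unfold Spec_formula69 formula69 formula69_alt
  by_cases h : step < 2
  · rw [PySem.List.pyRange_one_eq_nil (by omega)]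
    simp [h]
  · rw [Int.not_lt] at h
    have := pvLoop69 step h
    rw [show (PySem.List.pyRange 2 (step + 1) 1).foldl
        (fun (wh : Int × Int) i =>
          if PySem.Int.mod i 2 = 0 then (wh.1 + 2, wh.2 + 1)
          else if PySem.Int.mod i 2 = 1 then (wh.1, wh.2 + 1)
          else wh) (4, 3) = (PySem.List.pyRange 2 (step + 1) 1).foldl pvStep69 (4, 3) from rfl,
      this]
    rw [PySem.Int.floordiv_eq_ediv_of_pos (by norm_num)]
    simp [show ¬ step < 2 from by omega]
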